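-- pv_equiv track=rewrite | github.com/ZacharyKline/backend-nested-brackets | nested.py | arg_function
-- ===== SOURCE A (Python) =====
-- openers = ['[', '(', '{', '<', '(*']
--
-- closers = [']', ')', '}', '>', '*)']
--
-- def arg_function(args):
--     """Goes through each character and checks it again a list of openers and closers."""
--     # results = []
--     stack = []
--     unbalanced = False
--     pos = 0
--     while args:
--         token = args[0]
--         if args[:2] == '(*' or args[:2] == '*)':
--             token = args[:2]
--         pos += 1
--
--         if token in closers:
--             index = closers.index(token)
--             match = openers[index]
--             if stack.pop() != match:
--                 unbalanced = True
--                 break #unbalanced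
--
--         if token  in openers:
--             stack.append(token)
--
--         args = args[len(token):]
--
--
--
--     if stack or unbalanced:
--         return 'NO' + str(pos)
--     return 'YES'
-- ===== SOURCE B (Python) =====
-- openers = ['[', '(', '{', '<', '(*']
--
-- closers = [']', ')', '}', '>', '*)']
--
-- PAIRS = {']': '[', ')': '(', '}': '{', '>': '<', '*)': '(*'}
--
-- def arg_function(args):
--     """Single pass over the string with an index (no re-slicing), matching via a dict."""
--     stack = []
--     i = 0
--     pos = 0
--     n = len(args)
--     while i < n:
--         if args[i:i + 2] in ('(*', '*)'):
--             token = args[i:i + 2]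
--         else:
--             token = args[i]
--         i += len(token)
--         pos += 1
--         match = PAIRS.get(token)
--         if match is not None:
--             if not stack or stack.pop() != match:
--                 return 'NO' + str(pos)
--         elif token in PAIRS.values():
--             stack.append(token)
--     return 'NO' + str(pos) if stack else 'YES'
-- ===== Notes on version B (the rewrite author's own statement) =====
-- stated objective: faster
-- what changed: B replaces A's repeated tail-slicing (args = args[len(token):], a fresh string copy per token) and the closers.index list scan with a single index pass over the string and a closer-to-opener dict, returning early on a failed match.
import Mathlib
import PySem

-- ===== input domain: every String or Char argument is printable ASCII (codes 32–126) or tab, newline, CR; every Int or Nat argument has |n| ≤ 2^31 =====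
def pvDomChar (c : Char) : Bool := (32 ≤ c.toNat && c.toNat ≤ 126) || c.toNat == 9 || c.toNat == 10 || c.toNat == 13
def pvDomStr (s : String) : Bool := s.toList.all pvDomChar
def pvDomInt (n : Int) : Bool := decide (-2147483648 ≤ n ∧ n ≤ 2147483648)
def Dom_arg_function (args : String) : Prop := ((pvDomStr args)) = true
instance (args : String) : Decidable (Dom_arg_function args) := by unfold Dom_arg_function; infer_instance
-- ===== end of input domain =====

-- B replaces A's repeated tail-slicing scan (a fresh string copy per token) by a single
-- index pass with a closer→opener dict; objective: faster.

-- ===== PORT A =====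
-- Tokens are represented by their character lists (String is byte-backed in this Lean);
-- A's stack of opener tokens is a List (List Char).
def pvOpenersA : List (List Char) := [['['], ['('], ['{'], ['<'], ['(', '*']]
def pvClosersA : List (List Char) := [[']'], [')'], ['}'], ['>'], ['*', ')']]

-- one iteration of A's while-body once the token is known: none = stack.pop() raises
-- IndexError; .inl = break with final (stack, pos, unbalanced); .inr = continue with (stack, pos)
def pvTokA (token : List Char) (st : List (List Char)) (pos : Int) :
    Option ((List (List Char) × Int × Bool) ⊕ (List (List Char) × Int)) :=
  let p := pos + 1
  if token ∈ pvClosersA then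
    match st with
    | [] => none  -- Python: stack.pop() on an empty list raises IndexError
    | top :: st' =>
      -- match = openers[closers.index(token)]
      let m := (PySem.List.index? pvClosersA token).bind
        (fun i => PySem.List.pyGet? pvOpenersA (i : Int))
      if some top ≠ m then some (.inl (st', p, true))
      else if token ∈ pvOpenersA then some (.inr (token :: st', p))
      else some (.inr (st', p))
  else if token ∈ pvOpenersA then some (.inr (token :: st, p))
  else some (.inr (st, p))

-- A's while loop over the current first character c and the remaining characters rest:
-- args[:2] == '(*' / '*)' selects a two-char token, else the one-char token [c]
def pvGoA : Char → List Char → List (List Char) → Int →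
    Option (List (List Char) × Int × Bool)
  | c, r2 :: rr, st, pos =>
    if c = '(' ∧ r2 = '*' then
      match pvTokA ['(', '*'] st pos with
      | none => none
      | some (.inl f) => some f
      | some (.inr (st', p')) =>
        match rr with
        | [] => some (st', p', false)
        | d :: r' => pvGoA d r' st' p'
    else if c = '*' ∧ r2 = ')' then
      match pvTokA ['*', ')'] st pos with
      | none => none
      | some (.inl f) => some f
      | some (.inr (st', p')) =>
        match rr with
        | [] => some (st', p', false)
        | d :: r' => pvGoA d r' st' p'
    else
      match pvTokA [c] st pos with
      | none => none
      | some (.inl f) => some f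
      | some (.inr (st', p')) => pvGoA r2 rr st' p'
  | c, [], st, pos =>
    match pvTokA [c] st pos with
    | none => none
    | some (.inl f) => some f
    | some (.inr (st', p')) => some (st', p', false)

def arg_function (args : String) : String :=
  match (match args.toList with
         | [] => some ([], (0 : Int), false)
         | c :: rest => pvGoA c rest [] 0) with
  | none => ""  -- Python raises IndexError here; excluded by Pre_arg_function
  | some (st, pos, unb) =>
    if !st.isEmpty || unb then "NO" ++ PySem.Int.toStr pos else "YES"

-- ===== PORT B =====
-- PAIRS = {']':'[', ')':'(', '}':'{', '>':'<', '*)':'(*'}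
def pvPairsB : PySem.Dict (List Char) (List Char) :=
  PySem.Dict.ofList
    [([']'], ['[']), ([')'], ['(']), (['}'], ['{']), (['>'], ['<']), (['*', ')'], ['(', '*'])]

-- B's loop body for one token: .inl = early 'return NO+pos'; .inr = continue with (stack, pos)
def pvStepB (token : List Char) (st : List (List Char)) (pos : Int) :
    String ⊕ (List (List Char) × Int) :=
  let p := pos + 1
  match PySem.Dict.get? pvPairsB token with
  | some m =>
    match st with
    | [] => .inl ("NO" ++ PySem.Int.toStr p)      -- not stack → return
    | top :: st' =>
      if top ≠ m then .inl ("NO" ++ PySem.Int.toStr p) else .inr (st', p)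
  | none =>
    if token ∈ PySem.Dict.values pvPairsB then .inr (token :: st, p) else .inr (st, p)

-- after the loop: 'NO'+pos if the stack is nonempty, else 'YES'
def pvFinB (st : List (List Char)) (pos : Int) : String :=
  if !st.isEmpty then "NO" ++ PySem.Int.toStr pos else "YES"

-- B's single index pass: the cursor is (current char, remaining chars)
def pvGoB : Char → List Char → List (List Char) → Int → String
  | c, r2 :: rr, st, pos =>
    if c = '(' ∧ r2 = '*' then
      match pvStepB ['(', '*'] st pos with
      | .inl out => out
      | .inr (st', p') =>
        match rr with
        | [] => pvFinB st' p'
        | d :: r' => pvGoB d r' st' p'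
    else if c = '*' ∧ r2 = ')' then
      match pvStepB ['*', ')'] st pos with
      | .inl out => out
      | .inr (st', p') =>
        match rr with
        | [] => pvFinB st' p'
        | d :: r' => pvGoB d r' st' p'
    else
      match pvStepB [c] st pos with
      | .inl out => out
      | .inr (st', p') => pvGoB r2 rr st' p'
  | c, [], st, pos =>
    match pvStepB [c] st pos with
    | .inl out => out
    | .inr (st', p') => pvFinB st' p'

def arg_function_alt (args : String) : String :=
  match args.toList with
  | [] => pvFinB [] 0
  | c :: rest => pvGoB c rest [] 0

-- ===== PRECONDITION & SPEC =====
-- the matching opener token of a single-character closer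
def pvMatch1 (c : Char) : List Char :=
  if c = ']' then ['['] else if c = ')' then ['('] else if c = '}' then ['{'] else ['<']

-- Pre_ excludes exactly the inputs on which A raises IndexError: the token scan reaches a
-- closer while the opener stack is empty (before any mismatched closer has stopped the loop).
-- It is checked by a single left-to-right scan of the characters (a finite-state machine over
-- the tokens whose only memory is the open-opener stack); it computes no position and no output.
inductive PvSt
  | raised : PvSt                                    -- A's stack.pop() would raise here
  | stopped : PvSt                                   -- a mismatched closer: A stops, no raise
  | run : Option Char → List (List Char) → PvSt      -- pending '('/'*' lookahead, opener stack

-- effect of a one-character token c on the opener stack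
def pvApply1 (c : Char) (st : List (List Char)) : PvSt :=
  if c ∈ [']', ')', '}', '>'] then
    match st with
    | [] => .raised
    | top :: st' => if top = pvMatch1 c then .run none st' else .stopped
  else if c ∈ ['[', '{', '<'] then .run none ([c] :: st)
  else .run none st

def pvScanStep (s : PvSt) (c : Char) : PvSt :=
  match s with
  | .raised => .raised
  | .stopped => .stopped
  | .run none st => if c = '(' ∨ c = '*' then .run (some c) st else pvApply1 c st
  | .run (some p) st =>
    if p = '(' ∧ c = '*' then .run none (['(', '*'] :: st)
    else if p = '*' ∧ c = ')' then
      match st with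
      | [] => .raised
      | top :: st' => if top = ['(', '*'] then .run none st' else .stopped
    else
      -- the pending character stood alone: '(' opens, '*' is ordinary; then c is scanned
      if c = '(' ∨ c = '*' then .run (some c) (if p = '(' then ['('] :: st else st)
      else pvApply1 c (if p = '(' then ['('] :: st else st)

def pvScanOk (s : PvSt) : Bool :=
  match s with
  | .raised => false
  | _ => true

def Pre_arg_function (args : String) : Prop :=
  pvScanOk (args.toList.foldl pvScanStep (.run none [])) = true
instance (args : String) : Decidable (Pre_arg_function args) := by
  unfold Pre_arg_function; infer_instance
def pvWitness_arg_function : String := "(*[a]*){}"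

def Spec_arg_function (args : String) (out : String) : Prop := out = arg_function_alt args
instance (args : String) (out : String) : Decidable (Spec_arg_function args out) := by
  unfold Spec_arg_function; infer_instance

-- ===== CLAIM (what is proved, stated in full; the proofs are below) =====
def Claim_equal_arg_function : Prop :=
  ∀ (args : String), Dom_arg_function args → Pre_arg_function args →
    Spec_arg_function args (arg_function args)

-- ===== LEMMAS AND PROOFS =====
-- proof-internal restatement of the no-raise scan, shaped like the ports' loops
def pvGoNR : Char → List Char → List (List Char) → Bool
  | c, r2 :: rr, st =>
    if c = '(' ∧ r2 = '*' then
      match rr with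
      | [] => true
      | d :: r' => pvGoNR d r' (['(', '*'] :: st)
    else if c = '*' ∧ r2 = ')' then
      match st with
      | [] => false
      | top :: st' =>
        if top ≠ ['(', '*'] then true
        else
          match rr with
          | [] => true
          | d :: r' => pvGoNR d r' st'
    else if c ∈ [']', ')', '}', '>'] then
      match st with
      | [] => false
      | top :: st' => if top ≠ pvMatch1 c then true else pvGoNR r2 rr st'
    else if c ∈ ['[', '(', '{', '<'] then pvGoNR r2 rr ([c] :: st)
    else pvGoNR r2 rr st
  | c, [], st =>
    if c ∈ [']', ')', '}', '>'] then !st.isEmpty else true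

def pvRender : Option (List (List Char) × Int × Bool) → String
  | none => ""
  | some (st, pos, unb) => if !st.isEmpty || unb then "NO" ++ PySem.Int.toStr pos else "YES"

-- pvRender of a normal loop exit is B's epilogue
lemma pvRender_fin (st : List (List Char)) (p : Int) :
    pvRender (some (st, p, false)) = pvFinB st p := by simp [pvRender, pvFinB]

-- token-level facts: what one iteration does for each kind of token
lemma pvItemsB : pvPairsB.items =
    [([']'], ['[']), ([')'], ['(']), (['}'], ['{']), (['>'], ['<']), (['*', ')'], ['(', '*'])] := by
  decide
lemma pvmA2 : ((PySem.List.index? pvClosersA ['*', ')']).bind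
    (fun i => PySem.List.pyGet? pvOpenersA (i : Int))) = some ['(', '*'] := by decide
lemma pvmA1 {c : Char} (hc : c ∈ [']', ')', '}', '>']) :
    ((PySem.List.index? pvClosersA [c]).bind
      (fun i => PySem.List.pyGet? pvOpenersA (i : Int))) = some (pvMatch1 c) := by
  fin_cases hc <;> decide
lemma pvGetB2 : PySem.Dict.get? pvPairsB ['*', ')'] = some ['(', '*'] := by decide
lemma pvGetB1 {c : Char} (hc : c ∈ [']', ')', '}', '>']) :
    PySem.Dict.get? pvPairsB [c] = some (pvMatch1 c) := by fin_cases hc <;> decide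
lemma pvGetB_none {c : Char} (h1 : c ∉ [']', ')', '}', '>']) :
    PySem.Dict.get? pvPairsB [c] = none := by
  simp_all [PySem.Dict.get?, pvItemsB, List.find?_eq_none]
  tauto
lemma pvValuesB_none {c : Char} (h2 : c ∉ ['[', '(', '{', '<']) :
    [c] ∉ PySem.Dict.values pvPairsB := by
  simp_all [PySem.Dict.values, pvItemsB]
lemma pvTokA_open2 (st : List (List Char)) (pos : Int) :
    pvTokA ['(', '*'] st pos = some (.inr (['(', '*'] :: st, pos + 1)) := rfl
lemma pvStepB_open2 (st : List (List Char)) (pos : Int) :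
    pvStepB ['(', '*'] st pos = .inr (['(', '*'] :: st, pos + 1) := rfl
lemma pvTokA_close2_ne {top : List Char} (st : List (List Char)) (pos : Int)
    (hne : top ≠ ['(', '*']) :
    pvTokA ['*', ')'] (top :: st) pos = some (.inl (st, pos + 1, true)) := by
  simp only [pvTokA, pvmA2]
  simp [pvClosersA, hne]
lemma pvStepB_close2_ne {top : List Char} (st : List (List Char)) (pos : Int)
    (hne : top ≠ ['(', '*']) :
    pvStepB ['*', ')'] (top :: st) pos = .inl ("NO" ++ PySem.Int.toStr (pos + 1)) := by
  simp only [pvStepB, pvGetB2]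
  simp [hne]
lemma pvTokA_close2_eq (st : List (List Char)) (pos : Int) :
    pvTokA ['*', ')'] (['(', '*'] :: st) pos = some (.inr (st, pos + 1)) := rfl
lemma pvStepB_close2_eq (st : List (List Char)) (pos : Int) :
    pvStepB ['*', ')'] (['(', '*'] :: st) pos = .inr (st, pos + 1) := rfl
lemma pvTokA_close1_ne {c : Char} (hc : c ∈ [']', ')', '}', '>']) {top : List Char}
    (st : List (List Char)) (pos : Int) (hne : top ≠ pvMatch1 c) :
    pvTokA [c] (top :: st) pos = some (.inl (st, pos + 1, true)) := by
  have hmem : [c] ∈ pvClosersA := by fin_cases hc <;> decide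
  simp only [pvTokA, pvmA1 hc]
  simp [hmem, hne]
lemma pvStepB_close1_ne {c : Char} (hc : c ∈ [']', ')', '}', '>']) {top : List Char}
    (st : List (List Char)) (pos : Int) (hne : top ≠ pvMatch1 c) :
    pvStepB [c] (top :: st) pos = .inl ("NO" ++ PySem.Int.toStr (pos + 1)) := by
  simp only [pvStepB, pvGetB1 hc]
  simp [hne]
lemma pvTokA_close1_eq {c : Char} (hc : c ∈ [']', ')', '}', '>'])
    (st : List (List Char)) (pos : Int) :
    pvTokA [c] (pvMatch1 c :: st) pos = some (.inr (st, pos + 1)) := by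
  fin_cases hc <;> rfl
lemma pvStepB_close1_eq {c : Char} (hc : c ∈ [']', ')', '}', '>'])
    (st : List (List Char)) (pos : Int) :
    pvStepB [c] (pvMatch1 c :: st) pos = .inr (st, pos + 1) := by
  fin_cases hc <;> rfl
lemma pvTokA_open1 {c : Char} (hc : c ∈ ['[', '(', '{', '<'])
    (st : List (List Char)) (pos : Int) :
    pvTokA [c] st pos = some (.inr ([c] :: st, pos + 1)) := by fin_cases hc <;> rfl
lemma pvStepB_open1 {c : Char} (hc : c ∈ ['[', '(', '{', '<'])
    (st : List (List Char)) (pos : Int) :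
    pvStepB [c] st pos = .inr ([c] :: st, pos + 1) := by fin_cases hc <;> rfl
lemma pvTokA_other {c : Char} (h1 : c ∉ [']', ')', '}', '>']) (h2 : c ∉ ['[', '(', '{', '<'])
    (st : List (List Char)) (pos : Int) :
    pvTokA [c] st pos = some (.inr (st, pos + 1)) := by
  simp_all [pvTokA, pvClosersA, pvOpenersA]
lemma pvStepB_other {c : Char} (h1 : c ∉ [']', ')', '}', '>']) (h2 : c ∉ ['[', '(', '{', '<'])
    (st : List (List Char)) (pos : Int) :
    pvStepB [c] st pos = .inr (st, pos + 1) := by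
  simp only [pvStepB, pvGetB_none h1]
  simp [pvValuesB_none h2]

lemma pvMain (c : Char) (rest : List Char) (st : List (List Char)) (pos : Int)
    (h : pvGoNR c rest st = true) : pvRender (pvGoA c rest st pos) = pvGoB c rest st pos := by
  induction c, rest, st using pvGoNR.induct generalizing pos with
  | case1 c r2 st hc =>
    obtain ⟨rfl, rfl⟩ := hc
    simp [pvGoA, pvGoB, pvTokA_open2, pvStepB_open2, pvRender_fin]
  | case2 c r2 st hc d r' ih =>
    obtain ⟨rfl, rfl⟩ := hc
    rw [pvGoNR.eq_def] at h; simp at h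
    rw [pvGoA.eq_def, pvGoB.eq_def]
    simp [pvTokA_open2, pvStepB_open2]
    exact ih _ h
  | case3 c r2 rr hn1 hc =>
    obtain ⟨rfl, rfl⟩ := hc
    rw [pvGoNR.eq_def] at h; simp at h
  | case4 c r2 rr hn1 hc top st' hne =>
    obtain ⟨rfl, rfl⟩ := hc
    rw [pvGoA.eq_def, pvGoB.eq_def]
    simp [pvTokA_close2_ne st' pos hne, pvStepB_close2_ne st' pos hne, pvRender]
  | case5 c r2 hn1 hc top st' hne =>
    obtain ⟨rfl, rfl⟩ := hc
    rw [not_ne_iff] at hne; subst hne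
    rw [pvGoA.eq_def, pvGoB.eq_def]
    simp [pvTokA_close2_eq, pvStepB_close2_eq, pvRender_fin]
  | case6 c r2 hn1 hc top st' hne d r' ih =>
    obtain ⟨rfl, rfl⟩ := hc
    rw [not_ne_iff] at hne; subst hne
    rw [pvGoNR.eq_def] at h; simp at h
    rw [pvGoA.eq_def, pvGoB.eq_def]
    simp [pvTokA_close2_eq, pvStepB_close2_eq]
    exact ih _ h
  | case7 c r2 rr hn1 hn2 hc =>
    rw [pvGoNR.eq_def] at h; simp [hn1, hn2, hc] at h
  | case8 c r2 rr hn1 hn2 hc top st' hne =>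
    rw [pvGoA.eq_def, pvGoB.eq_def]
    simp [hn1, hn2, pvTokA_close1_ne hc st' pos hne, pvStepB_close1_ne hc st' pos hne, pvRender]
  | case9 c r2 rr hn1 hn2 hc top st' hne ih =>
    rw [not_ne_iff] at hne; subst hne
    rw [pvGoNR.eq_def] at h; simp [hn1, hn2, hc] at h
    rw [pvGoA.eq_def, pvGoB.eq_def]
    simp [hn1, hn2, pvTokA_close1_eq hc st' pos, pvStepB_close1_eq hc st' pos]
    exact ih _ h
  | case10 c r2 rr st hn1 hn2 hc1 hc ih =>
    rw [pvGoNR.eq_def] at h; simp [hn1, hn2, hc1, hc] at h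
    rw [pvGoA.eq_def, pvGoB.eq_def]
    simp [hn1, hn2, pvTokA_open1 hc st pos, pvStepB_open1 hc st pos]
    exact ih _ h
  | case11 c r2 rr st hn1 hn2 hc1 hc2 ih =>
    rw [pvGoNR.eq_def] at h; simp [hn1, hn2, hc1, hc2] at h
    rw [pvGoA.eq_def, pvGoB.eq_def]
    simp [hn1, hn2, pvTokA_other hc1 hc2 st pos, pvStepB_other hc1 hc2 st pos]
    exact ih _ h
  | case12 c st hc =>
    rw [pvGoNR.eq_def] at h; simp [hc] at h
    cases st with
    | nil => simp at h
    | cons top st' =>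
      rw [pvGoA.eq_def, pvGoB.eq_def]
      by_cases htop : top = pvMatch1 c
      · subst htop
        simp [pvTokA_close1_eq hc st' pos, pvStepB_close1_eq hc st' pos, pvRender_fin]
      · simp [pvTokA_close1_ne hc st' pos htop, pvStepB_close1_ne hc st' pos htop, pvRender]
  | case13 c st hc =>
    rw [pvGoA.eq_def, pvGoB.eq_def]
    by_cases hop : c ∈ ['[', '(', '{', '<']
    · simp [pvTokA_open1 hop st pos, pvStepB_open1 hop st pos, pvRender_fin, pvFinB]
    · simp [pvTokA_other hc hop st pos, pvStepB_other hc hop st pos, pvRender_fin]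

lemma pvScanOk_ite (P : Prop) [Decidable P] (b : List (List Char)) :
    pvScanOk (if P then PvSt.run none b else .stopped) = true := by split <;> rfl

lemma pvScanOk_ite2 (P : Prop) [Decidable P] (b b' : List (List Char)) :
    pvScanOk (if P then PvSt.run none b else .run none b') = true := by split <;> rfl

lemma pvScan_raised (l : List Char) : l.foldl pvScanStep .raised = .raised := by
  induction l <;> simp_all [List.foldl, pvScanStep]

lemma pvScan_stopped (l : List Char) : l.foldl pvScanStep .stopped = .stopped := by
  induction l <;> simp_all [List.foldl, pvScanStep]

-- the single-pass scan of Pre_ computes exactly the no-raise check pvGoNR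
lemma pvBridge (c : Char) (rest : List Char) (st : List (List Char)) :
    pvScanOk (List.foldl pvScanStep (pvScanStep (.run none st) c) rest) = pvGoNR c rest st := by
  induction c, rest, st using pvGoNR.induct with
  | case1 c r2 st hc =>
    obtain ⟨rfl, rfl⟩ := hc
    rw [pvGoNR.eq_def]
    simp [pvScanStep, pvScanOk]
  | case2 c r2 st hc d r' ih =>
    obtain ⟨rfl, rfl⟩ := hc
    rw [pvGoNR.eq_def]
    simpa [pvScanStep] using ih
  | case3 c r2 rr hn1 hc =>
    obtain ⟨rfl, rfl⟩ := hc
    rw [pvGoNR.eq_def]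
    simp [pvScanStep, pvScan_raised, pvScanOk]
  | case4 c r2 rr hn1 hc top st' hne =>
    obtain ⟨rfl, rfl⟩ := hc
    rw [pvGoNR.eq_def]
    simp [pvScanStep, pvScan_stopped, pvScanOk, hne]
  | case5 c r2 hn1 hc top st' hne =>
    obtain ⟨rfl, rfl⟩ := hc
    rw [not_ne_iff] at hne; subst hne
    rw [pvGoNR.eq_def]
    simp [pvScanStep, pvScanOk]
  | case6 c r2 hn1 hc top st' hne d r' ih =>
    obtain ⟨rfl, rfl⟩ := hc
    rw [not_ne_iff] at hne; subst hne
    rw [pvGoNR.eq_def]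
    simpa [pvScanStep] using ih
  | case7 c r2 rr hn1 hn2 hc =>
    rw [pvGoNR.eq_def]
    fin_cases hc <;> simp [pvScanStep, pvApply1, pvScan_raised, pvScanOk]
  | case8 c r2 rr hn1 hn2 hc top st' hne =>
    rw [pvGoNR.eq_def]
    fin_cases hc <;>
      simp_all [pvScanStep, pvApply1, pvMatch1, pvScan_stopped, pvScanOk]
  | case9 c r2 rr hn1 hn2 hc top st' hne ih =>
    rw [not_ne_iff] at hne; subst hne
    rw [pvGoNR.eq_def]
    fin_cases hc <;> simpa [pvScanStep, pvApply1, pvMatch1] using ih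
  | case10 c r2 rr st hn1 hn2 hc1 hc ih =>
    rw [pvGoNR.eq_def]
    fin_cases hc <;> simp_all [pvScanStep, pvApply1]
  | case11 c r2 rr st hn1 hn2 hc1 hc2 ih =>
    rw [pvGoNR.eq_def]
    have hnp : c ≠ '(' := fun hcp => hc2 (by simp [hcp])
    by_cases hstar : c = '*'
    · subst hstar
      have hr2 : r2 ≠ ')' := fun hr => hn2 ⟨rfl, hr⟩
      simp_all [pvScanStep, pvApply1]
    · simp_all [pvScanStep, pvApply1]
  | case12 c st hc =>
    rw [pvGoNR.eq_def]
    cases st with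
    | nil => fin_cases hc <;> simp [pvScanStep, pvApply1, pvScanOk]
    | cons top st' =>
      fin_cases hc <;> simp [pvScanStep, pvApply1, pvScanOk_ite]
  | case13 c st hc =>
    rw [pvGoNR.eq_def]
    by_cases hp : c = '(' ∨ c = '*'
    · simp [pvScanStep, hp, pvScanOk, hc]
    · simp_all [pvScanStep, pvApply1, pvScanOk_ite2]

-- ===== VERDICT (by name: the statement is the Claim_ definition above) =====
theorem arg_function_spec : Claim_equal_arg_function := by
  intro args _ hpre
  unfold Spec_arg_function arg_function arg_function_alt
  unfold Pre_arg_function at hpre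
  cases hcs : args.toList with
  | nil => rfl
  | cons c rest =>
    rw [hcs, List.foldl_cons, pvBridge] at hpre
    show pvRender (pvGoA c rest [] 0) = pvGoB c rest [] 0
    exact pvMain c rest [] 0 hpre
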